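-- pv_equiv track=rewrite | github.com/google/filament | third_party/dawn/third_party/angle/scripts/generate_stats.py | generate_duplicate_formula
-- ===== SOURCE A (Python) =====
-- def generate_duplicate_formula(headers, filter_columns):
--     # No more columns, put a 1 in the IF statement true branch
--     if len(filter_columns) == 0:
--         return '1'
--     # Next column is found, generate the formula for duplicate checking, and remove from the list
--     # for recursion
--     for i in range(len(headers)):
--         if headers[i] == filter_columns[0]:
--             col = str(i + 1)
--             formula = "IF(INDIRECT(ADDRESS(ROW(), " + col + "))=INDIRECT(ADDRESS(ROW() - 1, " + \
--                 col + "))," + generate_duplicate_formula(headers, filter_columns[1:]) + ",0)"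
--             return formula
--     # Next column not found, remove from recursion but just return whatever the next one is
--     return generate_duplicate_formula(headers, filter_columns[1:])
-- ===== SOURCE B (Python) =====
-- def generate_duplicate_formula(headers, filter_columns):
--     # Gather the 1-based header index (first match) of each filter column present.
--     cols = []
--     for fc in filter_columns:
--         if fc in headers:
--             cols.append(str(headers.index(fc) + 1))
--     # Build the formula iteratively, folding from the last collected column to the first.
--     result = '1'
--     for col in reversed(cols):
--         result = ("IF(INDIRECT(ADDRESS(ROW(), " + col + "))=INDIRECT(ADDRESS(ROW() - 1, " +
--                   col + "))," + result + ",0)")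
--     return result
-- ===== Notes on version B (the rewrite author's own statement) =====
-- stated objective: alternative
-- what changed: Replaces A's recursion over filter_columns (with an inner index-hunting loop per recursive call) by an explicit gather-then-fold: one pass collecting the 1-based indices of the present filter columns, then an iterative right-to-left fold building the formula string with no recursion.
import Mathlib
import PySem

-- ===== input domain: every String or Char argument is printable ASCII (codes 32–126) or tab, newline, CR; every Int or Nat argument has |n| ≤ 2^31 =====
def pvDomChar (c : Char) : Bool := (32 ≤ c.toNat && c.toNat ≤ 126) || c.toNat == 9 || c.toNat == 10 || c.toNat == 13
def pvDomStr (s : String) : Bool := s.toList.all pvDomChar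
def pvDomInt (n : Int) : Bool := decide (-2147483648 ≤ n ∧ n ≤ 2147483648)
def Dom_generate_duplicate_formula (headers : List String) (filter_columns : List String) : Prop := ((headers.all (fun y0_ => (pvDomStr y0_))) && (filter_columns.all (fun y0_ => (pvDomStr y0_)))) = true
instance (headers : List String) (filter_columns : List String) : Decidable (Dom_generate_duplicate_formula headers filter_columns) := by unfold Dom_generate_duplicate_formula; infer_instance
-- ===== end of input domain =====

-- B replaces A's recursion over filter_columns by a gather-then-fold loop (alternative decomposition, same cost).

-- ===== PORT A =====
-- the 'for i in range(len(headers)): if headers[i] == fc' search loop of A, with its running index i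
def gdfScan : List String → String → Nat → Option Nat
  | [], _, _ => none
  | h :: t, fc, i => if h = fc then some i else gdfScan t fc (i + 1)

def generate_duplicate_formula (headers : List String) (filter_columns : List String) : String :=
  match filter_columns with
  | [] => "1"
  | fc :: rest =>
    match gdfScan headers fc 0 with
    | some i =>
        let col := PySem.Int.toStr ((i : Int) + 1)
        "IF(INDIRECT(ADDRESS(ROW(), " ++ col ++ "))=INDIRECT(ADDRESS(ROW() - 1, " ++
          col ++ "))," ++ generate_duplicate_formula headers rest ++ ",0)"
    | none => generate_duplicate_formula headers rest

-- ===== PORT B =====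
-- first loop of Source B: collect the 1-based column-number strings of the present filter columns
def gdfCols (headers : List String) (filter_columns : List String) : List String :=
  filter_columns.foldl (fun cols fc =>
    if fc ∈ headers then
      match PySem.List.index? headers fc with
      | some i => cols ++ [PySem.Int.toStr ((i : Int) + 1)]
      | none => cols
    else cols) []

-- body of Source B's second loop
def gdfWrap (result : String) (col : String) : String :=
  "IF(INDIRECT(ADDRESS(ROW(), " ++ col ++ "))=INDIRECT(ADDRESS(ROW() - 1, " ++
    col ++ "))," ++ result ++ ",0)"

def generate_duplicate_formula_alt (headers : List String) (filter_columns : List String) : String :=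
  (gdfCols headers filter_columns).reverse.foldl gdfWrap "1"

-- ===== PRECONDITION & SPEC =====
def Spec_generate_duplicate_formula (headers : List String) (filter_columns : List String) (out : String) : Prop := out = generate_duplicate_formula_alt headers filter_columns
instance (headers : List String) (filter_columns : List String) (out : String) : Decidable (Spec_generate_duplicate_formula headers filter_columns out) := by unfold Spec_generate_duplicate_formula; infer_instance

-- ===== CLAIM (what is proved, stated in full; the proofs are below) =====
def Claim_equal_generate_duplicate_formula : Prop := ∀ (headers : List String) (filter_columns : List String), Dom_generate_duplicate_formula headers filter_columns → Spec_generate_duplicate_formula headers filter_columns (generate_duplicate_formula headers filter_columns)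

-- ===== LEMMAS AND PROOFS =====

theorem gdfScan_eq_index? (t : List String) (fc : String) (k : Nat) :
    gdfScan t fc k = (PySem.List.index? t fc).map (· + k) := by
  induction t generalizing k with
  | nil => simp [gdfScan, PySem.List.index?_eq_idxOf?, List.idxOf?]
  | cons h tl ih =>
    by_cases hfc : h = fc
    · subst hfc
      rw [PySem.List.index?_cons_self]
      simp [gdfScan]
    · rw [PySem.List.index?_cons_of_ne tl hfc]
      simp only [gdfScan, if_neg hfc, ih (k + 1), Option.map_map]
      congr 1
      funext x
      simp
      omega

-- the per-column contribution of Source B's first loop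
def gdfCol1 (headers : List String) (fc : String) : List String :=
  if fc ∈ headers then
    (match PySem.List.index? headers fc with
     | some i => [PySem.Int.toStr ((i : Int) + 1)]
     | none => [])
  else []

theorem gdfCols_eq_flatMap (headers : List String) (l : List String) :
    gdfCols headers l = l.flatMap (gdfCol1 headers) := by
  unfold gdfCols
  have hstep : (fun (cols : List String) (fc : String) =>
      if fc ∈ headers then
        match PySem.List.index? headers fc with
        | some i => cols ++ [PySem.Int.toStr ((i : Int) + 1)]
        | none => cols
      else cols) = fun cols fc => cols ++ gdfCol1 headers fc := by
    funext cols fc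
    unfold gdfCol1
    split
    · split <;> simp
    · simp
  rw [hstep, PySem.List.foldl_append_eq_flatMap]
  simp

theorem alt_foldr (headers : List String) (filter_columns : List String) :
    generate_duplicate_formula_alt headers filter_columns =
      (gdfCols headers filter_columns).foldr (fun col result => gdfWrap result col) "1" := by
  unfold generate_duplicate_formula_alt
  rw [List.foldl_reverse]

-- ===== VERDICT (by name: the statement is the Claim_ definition above) =====
theorem gdf_eq (headers : List String) (filter_columns : List String) :
    generate_duplicate_formula headers filter_columns =
      generate_duplicate_formula_alt headers filter_columns := by
  induction filter_columns with
  | nil => simp [generate_duplicate_formula, generate_duplicate_formula_alt, gdfCols]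
  | cons fc rest ih =>
    rw [alt_foldr, gdfCols_eq_flatMap, List.flatMap_cons, List.foldr_append, ← gdfCols_eq_flatMap, ← alt_foldr]
    by_cases hmem : fc ∈ headers
    · obtain ⟨i, hi⟩ := Option.isSome_iff_exists.mp
        ((PySem.List.index?_isSome_iff headers fc).mpr hmem)
      simp only [generate_duplicate_formula, gdfScan_eq_index?, hi, gdfCol1, if_pos hmem,
        Option.map_some, List.foldr_cons, List.foldr_nil, gdfWrap, Nat.add_zero]
      rw [ih]
    · have hnone := (PySem.List.index?_eq_none_iff headers fc).mpr hmem
      simp only [generate_duplicate_formula, gdfScan_eq_index?, hnone, gdfCol1, if_neg hmem,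
        Option.map_none, List.foldr_nil]
      exact ih

theorem generate_duplicate_formula_spec : Claim_equal_generate_duplicate_formula :=
  fun headers filter_columns _ => gdf_eq headers filter_columns
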